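-- pv_equiv track=rewrite | github.com/guilhermevigneron/pynative | basic.py | extract_digit_reverse
-- ===== SOURCE A (Python) =====
-- def extract_digit_reverse(number: int) -> str:
--     """11"""
--     reverse_num_str = ""
--     reverse_num = 0
--     while number > 0:
--         reminder = number % 10
--         reverse_num = reminder
--         reverse_num_str += str(reverse_num) + " "
--         number = number // 10
--
--     return reverse_num_str.strip()
-- ===== SOURCE B (Python) =====
-- def extract_digit_reverse(number: int) -> str:
--     if number <= 0:
--         return ""
--     return " ".join(reversed(str(number)))
-- ===== Notes on version B (the rewrite author's own statement) =====
-- stated objective: idiomatic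
-- what changed: B replaces the modulo/floor-division arithmetic loop that accumulates digit strings plus a trailing space (stripped at the end) with a direct string computation: guard non-positive input, then join the characters of the reversed decimal string with single spaces.
import Mathlib
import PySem

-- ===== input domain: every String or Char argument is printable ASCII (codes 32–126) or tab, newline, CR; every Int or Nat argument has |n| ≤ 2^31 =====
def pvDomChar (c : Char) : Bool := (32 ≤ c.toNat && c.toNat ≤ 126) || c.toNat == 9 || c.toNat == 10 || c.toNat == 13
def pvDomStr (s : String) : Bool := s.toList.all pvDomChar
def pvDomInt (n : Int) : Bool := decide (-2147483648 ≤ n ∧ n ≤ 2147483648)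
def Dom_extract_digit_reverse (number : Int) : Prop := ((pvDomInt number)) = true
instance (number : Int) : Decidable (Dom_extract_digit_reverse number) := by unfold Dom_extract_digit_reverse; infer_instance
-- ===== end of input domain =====

-- B replaces A's %10 / //10 accumulate-then-strip loop with "join the characters of the
-- reversed decimal string with spaces" (idiomatic; same return value on every int).

-- termination lemma for the port's while-loop (cited by decreasing_by)
theorem pvFloordivTenLt (n : Int) (h : 0 < n) :
    (PySem.Int.floordiv n 10).toNat < n.toNat := by
  rw [PySem.Int.floordiv_eq_ediv_of_pos (by norm_num)]
  omega

-- ===== PORT A =====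
def pvALoop (number : Int) (acc : List Char) : List Char :=
  if 0 < number then
    let reminder := PySem.Int.mod number 10
    let reverse_num := reminder
    pvALoop (PySem.Int.floordiv number 10)
      (acc ++ PySem.Int.toChars reverse_num ++ [' '])
  else acc
termination_by number.toNat
decreasing_by exact pvFloordivTenLt number (by assumption)

def extract_digit_reverse (number : Int) : String :=
  String.ofList (PySem.Chars.strip (pvALoop number []))

-- ===== PORT B =====
def extract_digit_reverse_alt (number : Int) : String :=
  if number ≤ 0 then ""
  else
    String.ofList
      (PySem.Chars.join [' '] ((PySem.Int.toChars number).reverse.map (fun c => [c])))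

-- ===== PRECONDITION & SPEC =====
def Spec_extract_digit_reverse (number : Int) (out : String) : Prop := out = extract_digit_reverse_alt number
instance (number : Int) (out : String) : Decidable (Spec_extract_digit_reverse number out) := by unfold Spec_extract_digit_reverse; infer_instance

-- ===== CLAIM (what is proved, stated in full; the proofs are below) =====
def Claim_equal_extract_digit_reverse : Prop := ∀ (number : Int), Dom_extract_digit_reverse number → Spec_extract_digit_reverse number (extract_digit_reverse number)

-- ===== LEMMAS AND PROOFS =====

theorem pvTDC_acc (f : Nat) : ∀ (n : Nat) (acc : List Char),
    Nat.toDigitsCore 10 f n acc = Nat.toDigitsCore 10 f n [] ++ acc := by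
  induction f with
  | zero => intro n acc; simp [Nat.toDigitsCore]
  | succ f ih =>
    intro n acc
    simp only [Nat.toDigitsCore]
    by_cases h : n / 10 = 0
    · simp [h]
    · simp only [h, if_false]
      rw [ih (n / 10) (Nat.digitChar (n % 10) :: acc),
          ih (n / 10) [Nat.digitChar (n % 10)]]
      simp

theorem pvTDC_fuel (f : Nat) : ∀ (g n : Nat) (acc : List Char), n < f → n < g →
    Nat.toDigitsCore 10 f n acc = Nat.toDigitsCore 10 g n acc := by
  induction f with
  | zero => intro g n acc hf _; omega
  | succ f ih =>
    intro g n acc hf hg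
    cases g with
    | zero => omega
    | succ g =>
      simp only [Nat.toDigitsCore]
      by_cases h : n / 10 = 0
      · simp [h]
      · simp only [h, if_false]
        have hn : 0 < n := by
          rcases Nat.eq_zero_or_pos n with h0 | h0
          · exact absurd (by simp [h0]) h
          · exact h0
        exact ih g (n / 10) _ (by omega) (by omega)

theorem pvToDigits_small (n : Nat) (h : n < 10) :
    Nat.toDigits 10 n = [Nat.digitChar n] := by
  simp [Nat.toDigits, Nat.toDigitsCore, Nat.div_eq_of_lt h, Nat.mod_eq_of_lt h]

theorem pvToDigits_step (n : Nat) (h : 10 ≤ n) :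
    Nat.toDigits 10 n = Nat.toDigits 10 (n / 10) ++ [Nat.digitChar (n % 10)] := by
  have hne : ¬ n / 10 = 0 := by
    have := Nat.div_le_div_right (c := 10) h
    simp at this; omega
  have hdiv : n / 10 < n := Nat.div_lt_self (by omega) (by norm_num)
  simp only [Nat.toDigits, Nat.toDigitsCore, hne, if_false]
  rw [pvTDC_acc n (n / 10) [Nat.digitChar (n % 10)]]
  congr 1
  exact pvTDC_fuel n (n / 10 + 1) (n / 10) [] hdiv (by omega)

theorem pvDigitChar_nonspace (n : Nat) (h : n < 10) :
    PySem.Chars.isspace (Nat.digitChar n) = false := by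
  interval_cases n <;> decide

theorem pvToDigits_nonspace (m : Nat) : ∀ c ∈ Nat.toDigits 10 m,
    PySem.Chars.isspace c = false := by
  induction m using Nat.strong_induction_on with
  | _ m ih =>
    intro c hc
    by_cases h : m < 10
    · rw [pvToDigits_small m h] at hc
      simp at hc
      subst hc
      exact pvDigitChar_nonspace m h
    · rw [pvToDigits_step m (by omega)] at hc
      rcases List.mem_append.mp hc with h1 | h1
      · exact ih (m / 10) (Nat.div_lt_self (by omega) (by norm_num)) c h1
      · simp at h1; subst h1
        exact pvDigitChar_nonspace _ (Nat.mod_lt _ (by norm_num))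

theorem pvALoop_append_aux (k : Nat) : ∀ (n : Int), n.toNat = k →
    ∀ (acc : List Char), pvALoop n acc = acc ++ pvALoop n [] := by
  induction k using Nat.strong_induction_on with
  | _ k ih =>
    intro n hk acc
    by_cases hn : 0 < n
    · conv_lhs => rw [pvALoop]
      conv_rhs => rw [pvALoop]
      simp only [if_pos hn]
      have hlt := pvFloordivTenLt n hn
      rw [ih (PySem.Int.floordiv n 10).toNat (by omega) _ rfl,
          ih (PySem.Int.floordiv n 10).toNat (by omega)
            (PySem.Int.floordiv n 10) rfl
            ([] ++ PySem.Int.toChars (PySem.Int.mod n 10) ++ [' '])]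
      simp
    · conv_lhs => rw [pvALoop]
      conv_rhs => rw [pvALoop]
      simp [if_neg hn]

theorem pvALoop_append (number : Int) (acc : List Char) :
    pvALoop number acc = acc ++ pvALoop number [] :=
  pvALoop_append_aux number.toNat number rfl acc

theorem pvCast_helpers (m : Nat) :
    PySem.Int.mod (m : Int) 10 = ((m % 10 : Nat) : Int) ∧
    PySem.Int.floordiv (m : Int) 10 = ((m / 10 : Nat) : Int) ∧
    PySem.Int.toChars ((m % 10 : Nat) : Int) = [Nat.digitChar (m % 10)] := by
  refine ⟨?_, ?_, ?_⟩
  · exact_mod_cast PySem.Int.mod_natCast m 10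
  · exact_mod_cast PySem.Int.floordiv_natCast m 10
  · have h10 : m % 10 < 10 := Nat.mod_lt _ (by norm_num)
    rw [PySem.Int.toChars, if_neg (by exact_mod_cast Int.not_lt.mpr (Int.natCast_nonneg _))]
    rw [Int.toNat_natCast]
    exact pvToDigits_small _ h10

theorem pvALoop_eq (m : Nat) (hm : 0 < m) :
    pvALoop (m : Int) [] =
      (Nat.toDigits 10 m).reverse.flatMap (fun c => [c, ' ']) := by
  induction m using Nat.strong_induction_on with
  | _ m ih =>
    obtain ⟨h1, h2, h3⟩ := pvCast_helpers m
    rw [pvALoop, if_pos (by exact_mod_cast hm)]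
    simp only [h1, h2, h3, List.nil_append]
    by_cases hlt : m < 10
    · have hd0 : m / 10 = 0 := Nat.div_eq_of_lt hlt
      rw [hd0]
      rw [pvALoop, if_neg (by norm_num)]
      rw [pvToDigits_small m hlt, Nat.mod_eq_of_lt hlt]
      simp
    · have hdpos : 0 < m / 10 := Nat.div_pos (by omega) (by norm_num)
      rw [pvALoop_append, ih (m / 10) (Nat.div_lt_self (by omega) (by norm_num)) hdpos]
      rw [pvToDigits_step m (by omega)]
      simp

theorem pvRstrip_append (a b : List Char) (h : PySem.Chars.rstrip b ≠ []) :
    PySem.Chars.rstrip (a ++ b) = a ++ PySem.Chars.rstrip b := by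
  simp only [PySem.Chars.rstrip] at *
  rw [List.reverse_append, List.dropWhile_append]
  have hb : ¬ (List.dropWhile PySem.Chars.isspace b.reverse).isEmpty = true := by
    intro hcontra
    exact h (by simp [List.isEmpty_iff.mp hcontra])
  simp [hb]

theorem pvJoin_cons_ne_nil (d : Char) (rest : List (List Char)) :
    PySem.Chars.join [' '] ([d] :: rest) ≠ [] := by
  cases rest with
  | nil => simp [PySem.Chars.join_singleton]
  | cons y r => rw [PySem.Chars.join_cons_cons]; simp

theorem pvRstripJoin (cs : List Char) (h : ∀ c ∈ cs, PySem.Chars.isspace c = false) :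
    PySem.Chars.rstrip (cs.flatMap (fun c => [c, ' '])) =
      PySem.Chars.join [' '] (cs.map (fun c => [c])) := by
  have hsp : PySem.Chars.isspace ' ' = true := rfl
  induction cs with
  | nil => simp [PySem.Chars.rstrip, PySem.Chars.join, List.intercalate]
  | cons c t ih =>
    have hc : PySem.Chars.isspace c = false := h c (by simp)
    have ht : ∀ x ∈ t, PySem.Chars.isspace x = false := fun x hx => h x (by simp [hx])
    cases t with
    | nil =>
      simp [PySem.Chars.rstrip, PySem.Chars.join, List.intercalate,
        List.dropWhile, hc, hsp]
    | cons d t' =>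
      have hne : PySem.Chars.rstrip ((d :: t').flatMap (fun c => [c, ' '])) ≠ [] := by
        rw [ih ht]
        simp only [List.map_cons]
        exact pvJoin_cons_ne_nil d _
      have hsplit : (c :: d :: t').flatMap (fun c => [c, ' '])
          = [c, ' '] ++ (d :: t').flatMap (fun c => [c, ' ']) := by simp
      rw [hsplit, pvRstrip_append _ _ hne, ih ht]
      simp only [List.map_cons]
      rw [PySem.Chars.join_cons_cons]
      simp

theorem pvLstrip_flat (cs : List Char) (h : ∀ c ∈ cs, PySem.Chars.isspace c = false) :
    PySem.Chars.lstrip (cs.flatMap (fun c => [c, ' '])) =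
      cs.flatMap (fun c => [c, ' ']) := by
  cases cs with
  | nil => simp [PySem.Chars.lstrip]
  | cons c t =>
    have hc : PySem.Chars.isspace c = false := h c (by simp)
    simp [PySem.Chars.lstrip, hc]

-- ===== VERDICT (by name: the statement is the Claim_ definition above) =====
theorem extract_digit_reverse_spec : Claim_equal_extract_digit_reverse := by
  intro number _
  unfold Spec_extract_digit_reverse extract_digit_reverse extract_digit_reverse_alt
  by_cases hpos : 0 < number
  · rw [if_neg (by omega)]
    have hm : 0 < number.toNat := by omega
    have hcast : ((number.toNat : Int)) = number := Int.toNat_of_nonneg hpos.le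
    have hns : ∀ c ∈ (Nat.toDigits 10 number.toNat).reverse,
        PySem.Chars.isspace c = false := by
      intro c hc
      exact pvToDigits_nonspace number.toNat c (List.mem_reverse.mp hc)
    have htc : PySem.Int.toChars ((number.toNat : Int)) = Nat.toDigits 10 number.toNat := by
      rw [PySem.Int.toChars, if_neg (by exact_mod_cast Int.not_lt.mpr (Int.natCast_nonneg _))]
      rw [Int.toNat_natCast]
    rw [← hcast, pvALoop_eq number.toNat hm]
    rw [PySem.Chars.strip, pvLstrip_flat _ hns, pvRstripJoin _ hns, htc]
  · rw [if_pos (by omega)]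
    rw [pvALoop, if_neg hpos]
    simp [PySem.Chars.strip, PySem.Chars.lstrip, PySem.Chars.rstrip]
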